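-- pv_equiv track=rewrite | github.com/Hk4Fun/algorithm_offer | target_offer/35_2_字符串中删除字符.py | delete_char2
-- ===== SOURCE A (Python) =====
-- def delete_char2(s1, s2):
--     if s1 == None or s2 == None:
--         return
--     d = dict(zip(s2, [1] * len(s2)))
--     result = []
--     for i in s1:
--         try:
--             if d[i]:
--                 continue
--         except KeyError:
--             result.append(i)
--     return ''.join(result)
-- ===== SOURCE B (Python) =====
-- def delete_char2(s1, s2):
--     if s1 == None or s2 == None:
--         return
--     for ch in set(s2):
--         s1 = s1.replace(ch, '')
--     return s1
-- ===== Notes on version B (the rewrite author's own statement) =====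
-- stated objective: alternative
-- what changed: Instead of one pass over s1 with a presence dict and a try/except per character, B makes one str.replace pass over the remaining string for each distinct character of s2, shrinking the string in stages; correct because removals of distinct characters commute.
import Mathlib
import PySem

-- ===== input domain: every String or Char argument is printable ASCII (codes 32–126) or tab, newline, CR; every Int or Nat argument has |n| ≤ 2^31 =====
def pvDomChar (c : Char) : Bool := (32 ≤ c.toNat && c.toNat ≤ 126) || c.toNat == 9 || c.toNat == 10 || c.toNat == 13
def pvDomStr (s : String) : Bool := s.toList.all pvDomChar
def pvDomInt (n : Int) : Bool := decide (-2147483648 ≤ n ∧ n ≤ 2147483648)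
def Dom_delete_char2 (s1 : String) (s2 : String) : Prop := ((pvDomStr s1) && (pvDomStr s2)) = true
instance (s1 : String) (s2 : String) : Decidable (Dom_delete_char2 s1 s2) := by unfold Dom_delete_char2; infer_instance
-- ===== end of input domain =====

-- B replaces A's single filtering pass (presence dict + try/except over s1) with staged
-- str.replace passes, one per distinct character of s2 (alternative decomposition);
-- return values proved equal on all strings (the None guard is unreachable under String).

-- ===== PORT A =====
-- d = dict(zip(s2, [1]*len(s2))); for i in s1: try: if d[i]: continue; except KeyError: result.append(i)
def delete_char2 (s1 : String) (s2 : String) : String :=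
  let d : PySem.Dict Char Int :=
    PySem.Dict.ofList (s2.toList.map (fun c => (c, (1 : Int))))
  let result : List Char :=
    s1.toList.foldl
      (fun acc i =>
        match d.get? i with
        | some v => if v ≠ 0 then acc else acc   -- 'if d[i]: continue' (falsy value also appends nothing)
        | none => acc ++ [i])                    -- KeyError → result.append(i)
      []
  String.ofList result                               -- ''.join(result)

-- ===== PORT B =====
-- for ch in set(s2): s1 = s1.replace(ch, ''); return s1
def delete_char2_alt (s1 : String) (s2 : String) : String :=
  (PySem.Set.ofList s2.toList).foldl
    (fun s ch => PySem.Str.replace s (String.ofList [ch]) "") s1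

-- ===== PRECONDITION & SPEC =====
def Spec_delete_char2 (s1 : String) (s2 : String) (out : String) : Prop := out = delete_char2_alt s1 s2
instance (s1 : String) (s2 : String) (out : String) : Decidable (Spec_delete_char2 s1 s2 out) := by unfold Spec_delete_char2; infer_instance

-- ===== CLAIM =====
def Claim_equal_delete_char2 : Prop := ∀ (s1 : String) (s2 : String), Dom_delete_char2 s1 s2 → Spec_delete_char2 s1 s2 (delete_char2 s1 s2)

-- ===== LEMMAS AND PROOFS =====

-- replace.go with a one-char pattern and empty replacement filters that char out
theorem replace_go_single (c : Char) (l : List Char) :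
    ∀ (fuel : Nat) (acc : List Char), l.length ≤ fuel →
      PySem.Chars.replace.go [c] [] fuel l acc = acc.reverse ++ l.filter (· ≠ c) := by
  induction l with
  | nil =>
    intro fuel acc _
    cases fuel <;> simp [PySem.Chars.replace.go]
  | cons x t ih =>
    intro fuel acc h
    cases fuel with
    | zero => simp at h
    | succ f =>
      rw [PySem.Chars.replace.go]
      by_cases hx : x = c
      · subst hx
        simp only [List.isPrefixOf, beq_self_eq_true, Bool.true_and,
          if_pos, List.length_singleton, List.drop_one, List.tail_cons, List.reverse_nil,
          List.nil_append]
        rw [ih f acc (by simpa using Nat.le_of_succ_le_succ h)]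
        simp
      · have hp : [c].isPrefixOf (x :: t) = false := by
          simp [List.isPrefixOf]; exact fun h' => hx h'.symm
        rw [hp]
        simp only [Bool.false_eq_true, if_false]
        rw [ih f (x :: acc) (Nat.le_of_succ_le_succ h)]
        simp [hx]

theorem replace_single_empty (cs : List Char) (c : Char) :
    PySem.Chars.replace cs [c] [] = cs.filter (· ≠ c) := by
  rw [PySem.Chars.replace]
  simp only [List.isEmpty_cons, Bool.false_eq_true, if_false]
  exact replace_go_single c cs cs.length [] (le_refl _)

-- folding per-character replace passes over a list of chars filters out all of them
theorem fold_replace_eq_filter (l : List Char) (s : String) :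
    ((l.foldl (fun t ch => PySem.Str.replace t (String.ofList [ch]) "") s)).toList
      = s.toList.filter (fun c => !l.contains c) := by
  induction l generalizing s with
  | nil => simp
  | cons x xs ih =>
    rw [List.foldl_cons, ih]
    have : (PySem.Str.replace s (String.ofList [x]) "").toList = s.toList.filter (· ≠ x) := by
      rw [PySem.Str.replace]
      simp only [String.toList_ofList]
      rw [show ("" : String).toList = [] from rfl, replace_single_empty]
    rw [this, List.filter_filter]
    apply List.filter_congr
    intro c _
    by_cases hx : c = x <;> simp [hx]

-- looking up any key after inserting (x, 1) for every x of l: none iff absent before and not in l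
theorem get?_foldl_insert_one_eq_none
    (l : List Char) (d : PySem.Dict Char Int) (c : Char) :
    ((l.foldl (fun acc x => acc.insert x (1 : Int)) d).get? c = none) ↔
      (d.get? c = none ∧ c ∉ l) := by
  induction l generalizing d with
  | nil => simp
  | cons x xs ih =>
    simp only [List.foldl_cons, ih, PySem.Dict.get?_insert, List.mem_cons]
    by_cases hx : c = x <;> simp [hx]

-- ===== VERDICT =====
theorem delete_char2_spec : Claim_equal_delete_char2 := by
  unfold Claim_equal_delete_char2
  intro s1 s2 _
  unfold Spec_delete_char2 delete_char2 delete_char2_alt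
  simp only []
  apply String.toList_inj.mp
  rw [fold_replace_eq_filter]
  have hstep :
      (fun (acc : List Char) (i : Char) =>
        match (PySem.Dict.ofList (s2.toList.map (fun c => (c, (1 : Int))))).get? i with
        | some v => if v ≠ 0 then acc else acc
        | none => acc ++ [i]) =
      (fun (acc : List Char) (i : Char) =>
        if ((PySem.Dict.ofList (s2.toList.map (fun c => (c, (1 : Int))))).get? i).isNone
        then acc ++ [i] else acc) := by
    funext acc i
    cases h : (PySem.Dict.ofList (s2.toList.map (fun c => (c, (1 : Int))))).get? i <;> simp
  show (String.ofList (s1.toList.foldl _ [])).toList = _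
  rw [hstep, PySem.List.foldl_append_if_eq_filter, List.nil_append]
  simp only [String.toList_ofList]
  apply List.filter_congr
  intro c _
  have hd : ((PySem.Dict.ofList (s2.toList.map (fun c => (c, (1 : Int))))).get? c = none) ↔
      c ∉ s2.toList := by
    have := get?_foldl_insert_one_eq_none s2.toList PySem.Dict.empty c
    simpa [PySem.Dict.ofList, PySem.Dict.update, List.foldl_map] using this
  have hs : List.contains (PySem.Set.ofList s2.toList) c = decide (c ∈ s2.toList) := by
    simp [PySem.Set.mem_ofList]
  rw [hs]
  by_cases hc : c ∈ s2.toList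
  · have h1 : (PySem.Dict.ofList (s2.toList.map (fun c => (c, (1 : Int))))).get? c ≠ none :=
      fun h => (hd.mp h) hc
    cases hopt : (PySem.Dict.ofList (s2.toList.map (fun c => (c, (1 : Int))))).get? c with
    | none => exact absurd hopt h1
    | some v => simp [hc]
  · rw [hd.mpr hc]
    simp [hc]
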